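-- pv_equiv track=rewrite | github.com/subinium/ProjectEuler | solved/p271.py | prime_remain
-- ===== SOURCE A (Python) =====
-- def prime_remain(prime):
--     ret = []
--     for i in prime:
--         remain_i = []
--         for j in range(1, i):
--             if (j**3)%i==1 :
--                 remain_i.append(j)
--         ret.append(remain_i)
--     return ret
-- ===== SOURCE B (Python) =====
-- def prime_remain(prime):
--     # Alternative algorithm: maintains c = j**3 % i via the third-order
--     # finite-difference recurrence instead of computing j**3 for every j.
--     result = []
--     for i in prime:
--         roots = []
--         if i > 1:
--             c, d1, d2 = 1 % i, 7 % i, 12 % i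
--             for j in range(1, i):
--                 if c == 1:
--                     roots.append(j)
--                 c = (c + d1) % i
--                 d1 = (d1 + d2) % i
--                 d2 = (d2 + 6) % i
--         result.append(roots)
--     return result
-- ===== Notes on version B (the rewrite author's own statement) =====
-- stated objective: alternative
-- what changed: Replaces A's per-j exponentiation test (j**3) % i == 1 by a third-order finite-difference recurrence that maintains j**3 mod i (and its first and second differences) with additions only, so the inner loop is multiplication-free.
import Mathlib
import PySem

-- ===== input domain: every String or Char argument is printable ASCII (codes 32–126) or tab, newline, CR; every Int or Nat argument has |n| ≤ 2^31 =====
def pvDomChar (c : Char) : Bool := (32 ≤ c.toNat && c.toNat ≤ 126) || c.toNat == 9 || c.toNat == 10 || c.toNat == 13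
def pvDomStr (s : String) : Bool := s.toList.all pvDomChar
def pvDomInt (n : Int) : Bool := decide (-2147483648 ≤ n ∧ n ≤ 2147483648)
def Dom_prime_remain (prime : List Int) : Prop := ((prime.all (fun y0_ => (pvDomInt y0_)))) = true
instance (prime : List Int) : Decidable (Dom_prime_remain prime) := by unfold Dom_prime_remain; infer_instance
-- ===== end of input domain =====

-- B replaces A's per-j exponentiation (j**3) % i by a multiplication-free
-- third-order finite-difference recurrence maintaining j**3 mod i (objective: alternative algorithm, same cost).

-- ===== PORT A =====
def prime_remain (prime : List Int) : List (List Int) :=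
  prime.foldl
    (fun ret i =>
      ret ++ [(PySem.List.pyRange 1 i 1).foldl
        (fun remain_i j =>
          if PySem.Int.mod (j ^ 3) i == 1 then remain_i ++ [j] else remain_i) []])
    []

-- ===== PORT B =====
-- one step of B's inner loop: (c, d1, d2, roots) for the next j
def pvAltStep (i : Int) (st : Int × Int × Int × List Int) (j : Int) : Int × Int × Int × List Int :=
  (PySem.Int.mod (st.1 + st.2.1) i, PySem.Int.mod (st.2.1 + st.2.2.1) i,
   PySem.Int.mod (st.2.2.1 + 6) i,
   if st.1 == 1 then st.2.2.2 ++ [j] else st.2.2.2)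

def pvAltInner (i : Int) : List Int :=
  if 1 < i then
    ((PySem.List.pyRange 1 i 1).foldl (pvAltStep i)
      (PySem.Int.mod 1 i, PySem.Int.mod 7 i, PySem.Int.mod 12 i, [])).2.2.2
  else []

def prime_remain_alt (prime : List Int) : List (List Int) :=
  prime.foldl (fun result i => result ++ [pvAltInner i]) []

-- ===== PRECONDITION & SPEC =====
def Spec_prime_remain (prime : List Int) (out : List (List Int)) : Prop := out = prime_remain_alt prime
instance (prime : List Int) (out : List (List Int)) : Decidable (Spec_prime_remain prime out) := by unfold Spec_prime_remain; infer_instance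

-- ===== CLAIM (what is proved, stated in full; the proofs are below) =====
def Claim_equal_prime_remain : Prop := ∀ (prime : List Int), Dom_prime_remain prime → Spec_prime_remain prime (prime_remain prime)

-- ===== LEMMAS AND PROOFS =====

-- invariant: B's state at position j carries j^3, its first and its second finite
-- difference, each reduced mod i; then the two inner folds produce the same list.
theorem pv_inner_inv (i : Int) (hi : 1 < i) :
    ∀ (n : Nat) (j c d1 d2 : Int) (acc : List Int),
      (i - j).toNat = n →
      c = PySem.Int.mod (j ^ 3) i →
      d1 = PySem.Int.mod (3 * j ^ 2 + 3 * j + 1) i →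
      d2 = PySem.Int.mod (6 * j + 6) i →
      ((PySem.List.pyRange j i 1).foldl (pvAltStep i) (c, d1, d2, acc)).2.2.2 =
        (PySem.List.pyRange j i 1).foldl
          (fun remain_i k =>
            if PySem.Int.mod (k ^ 3) i == 1 then remain_i ++ [k] else remain_i) acc := by
  intro n
  induction n with
  | zero =>
    intro j c d1 d2 acc hn hc hd1 hd2
    have hij : i ≤ j := by omega
    rw [PySem.List.pyRange_one_eq_nil hij]
    simp [List.foldl]
  | succ m ih =>
    intro j c d1 d2 acc hn hc hd1 hd2
    have hji : j < i := by omega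
    rw [PySem.List.pyRange_one_cons hji]
    simp only [List.foldl_cons]
    have hpos : (0:Int) < i := by omega
    have hmod : ∀ a : Int, PySem.Int.mod a i = a % i := fun a =>
      PySem.Int.mod_eq_emod_of_pos (a:=a) hpos
    have hstep : pvAltStep i (c, d1, d2, acc) j =
        (PySem.Int.mod ((j + 1) ^ 3) i,
         PySem.Int.mod (3 * (j + 1) ^ 2 + 3 * (j + 1) + 1) i,
         PySem.Int.mod (6 * (j + 1) + 6) i,
         if PySem.Int.mod (j ^ 3) i == 1 then acc ++ [j] else acc) := by
      subst hc hd1 hd2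
      unfold pvAltStep
      simp only [hmod]
      refine Prod.ext ?_ (Prod.ext ?_ (Prod.ext ?_ rfl))
      · show (j ^ 3 % i + (3 * j ^ 2 + 3 * j + 1) % i) % i = (j + 1) ^ 3 % i
        rw [← Int.add_emod]
        ring_nf
      · show ((3 * j ^ 2 + 3 * j + 1) % i + (6 * j + 6) % i) % i =
          (3 * (j + 1) ^ 2 + 3 * (j + 1) + 1) % i
        rw [← Int.add_emod]
        ring_nf
      · show ((6 * j + 6) % i + 6) % i = (6 * (j + 1) + 6) % i
        rw [Int.emod_add_emod]
        ring_nf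
    rw [hstep]
    exact ih (j + 1) _ _ _ _ (by omega) rfl rfl rfl

theorem pv_inner_eq (i : Int) :
    pvAltInner i =
      (PySem.List.pyRange 1 i 1).foldl
        (fun remain_i j =>
          if PySem.Int.mod (j ^ 3) i == 1 then remain_i ++ [j] else remain_i) [] := by
  unfold pvAltInner
  by_cases hi : 1 < i
  · rw [if_pos hi]
    have h1 : PySem.Int.mod 1 i = PySem.Int.mod ((1:Int) ^ 3) i := by norm_num
    have h7 : PySem.Int.mod 7 i = PySem.Int.mod (3 * (1:Int) ^ 2 + 3 * 1 + 1) i := by norm_num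
    have h12 : PySem.Int.mod 12 i = PySem.Int.mod (6 * (1:Int) + 6) i := by norm_num
    rw [h1, h7, h12]
    exact pv_inner_inv i hi (i - 1).toNat 1 _ _ _ [] rfl rfl rfl rfl
  · rw [if_neg hi]
    rw [PySem.List.pyRange_one_eq_nil (by omega)]
    simp [List.foldl]

-- ===== VERDICT (by name: the statement is the Claim_ definition above) =====
theorem prime_remain_spec : Claim_equal_prime_remain := by
  intro prime _
  show prime_remain prime = prime_remain_alt prime
  unfold prime_remain prime_remain_alt
  simp only [pv_inner_eq]
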